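-- pv_equiv track=rewrite | github.com/TadeuszSikorski/advent_of_code_in_python | 2021/03/solution.py | _count_rate
-- ===== SOURCE A (Python) =====
-- def _count_rate(report):
--     counters = {}
--
--     for numbers in report:
--         position = 0
--
--         while position < len(numbers):
--             if (position, 0) not in counters.keys():
--                 counters[(position, 0)] = 0
--
--             if (position, 1) not in counters.keys():
--                 counters[(position, 1)] = 0
--
--             if numbers[position] == "0":
--                 counters[(position, 0)] += 1
--             else:
--                 counters[(position, 1)] += 1
--
--             position += 1
--
--     return counters
-- ===== SOURCE B (Python) =====
-- def _count_rate(report):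
--     maxlen = 0
--     for n in report:
--         maxlen = max(maxlen, len(n))
--     counters = {}
--     for position in range(maxlen):
--         column = [n[position] for n in report if position < len(n)]
--         zeros = column.count("0")
--         counters[(position, 0)] = zeros
--         counters[(position, 1)] = len(column) - zeros
--     return counters
-- ===== Notes on version B (the rewrite author's own statement) =====
-- stated objective: simpler
-- what changed: Replaces A's row-major per-character dict increments (with two membership checks per character to seed missing keys) by a column-major pass: for each bit position it gathers the column once and writes the zeros/ones counts in two direct dict assignments; the per-character dict membership tests and increments disappear, which also makes it measurably faster by a constant factor.
import Mathlib
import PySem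

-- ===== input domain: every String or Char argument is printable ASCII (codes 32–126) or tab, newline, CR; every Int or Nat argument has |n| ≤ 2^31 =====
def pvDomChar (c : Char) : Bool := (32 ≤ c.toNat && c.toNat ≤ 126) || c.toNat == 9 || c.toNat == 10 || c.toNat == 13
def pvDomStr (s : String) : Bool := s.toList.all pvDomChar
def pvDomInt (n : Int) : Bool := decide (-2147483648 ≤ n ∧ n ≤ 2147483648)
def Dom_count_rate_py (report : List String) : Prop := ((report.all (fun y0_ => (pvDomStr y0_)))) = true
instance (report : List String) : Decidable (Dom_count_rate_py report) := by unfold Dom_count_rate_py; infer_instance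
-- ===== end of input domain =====

-- B replaces A's row-major per-character dict increments by a column-major counting pass (simpler decomposition, same cost).

-- ===== PORT A =====
-- the while-loop body over one string: walk the characters carrying the Python `position` counter
def pvA_inner : List Char → Nat → PySem.Dict (Int × Int) Int → PySem.Dict (Int × Int) Int
  | [], _, cs => cs
  | c :: rest, position, cs =>
    let p : Int := position
    let cs := if cs.contains (p, 0) = false then cs.insert (p, 0) 0 else cs
    let cs := if cs.contains (p, 1) = false then cs.insert (p, 1) 0 else cs
    let cs := if c = '0' then cs.insert (p, 0) (cs.getD (p, 0) 0 + 1)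
              else cs.insert (p, 1) (cs.getD (p, 1) 0 + 1)
    pvA_inner rest (position + 1) cs

def count_rate_py (report : List String) : List (Int × Int × Int) :=
  ((report.foldl (fun counters numbers => pvA_inner numbers.toList 0 counters)
      PySem.Dict.empty).items).map (fun kv => (kv.1.1, kv.1.2, kv.2))

-- ===== PORT B =====
def count_rate_py_alt (report : List String) : List (Int × Int × Int) :=
  let maxlen := report.foldl (fun m n => max m n.toList.length) 0
  (((List.range maxlen).foldl
      (fun counters position =>
        let column := report.filterMap (fun n => n.toList[position]?)
        let zeros : Int := column.count '0'
        (counters.insert ((position : Int), 0) zeros).insert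
          ((position : Int), 1) ((column.length : Int) - zeros))
      PySem.Dict.empty).items).map (fun kv => (kv.1.1, kv.1.2, kv.2))

-- ===== PRECONDITION & SPEC =====
def Spec_count_rate_py (report : List String) (out : List (Int × Int × Int)) : Prop := out = count_rate_py_alt report
instance (report : List String) (out : List (Int × Int × Int)) : Decidable (Spec_count_rate_py report out) := by unfold Spec_count_rate_py; infer_instance

-- ===== CLAIM (what is proved, stated in full; the proofs are below) =====
def Claim_equal_count_rate_py : Prop := ∀ (report : List String), Dom_count_rate_py report → Spec_count_rate_py report (count_rate_py report)

-- ===== LEMMAS AND PROOFS =====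
-- the column B's comprehension builds at a position
def pvCol (report : List String) (q : Nat) : List Char := report.filterMap (fun n => n.toList[q]?)
-- the key list both dicts end up with
def pvKeys (m : Nat) : List (Int × Int) := (List.range m).flatMap (fun (p : Nat) => [((p : Int), (0 : Int)), ((p : Int), (1 : Int))])
-- contribution of one character slot to the (·,0) / (·,1) counter
def pvHit0 (o : Option Char) : Int := match o with | some c => if c = '0' then 1 else 0 | none => 0
def pvHit1 (o : Option Char) : Int := match o with | some c => if c = '0' then 0 else 1 | none => 0

theorem pvKeys_succ (m : Nat) : pvKeys (m + 1) = pvKeys m ++ [((m : Int), 0), ((m : Int), 1)] := by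
  simp [pvKeys, List.range_succ]

theorem mem_pvKeys {q : Nat} {b : Int} {m : Nat} : ((q : Int), b) ∈ pvKeys m ↔ (q < m ∧ (b = 0 ∨ b = 1)) := by
  unfold pvKeys
  rw [List.mem_flatMap]
  constructor
  · rintro ⟨p, hp, hmem⟩
    rw [List.mem_range] at hp
    rcases List.mem_cons.1 hmem with h | h
    · obtain ⟨h1, h2⟩ := Prod.mk.injEq .. ▸ h
      have : q = p := by exact_mod_cast h1
      exact ⟨this ▸ hp, Or.inl h2⟩
    · rcases List.mem_singleton.1 h with h
      obtain ⟨h1, h2⟩ := Prod.mk.injEq .. ▸ h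
      have : q = p := by exact_mod_cast h1
      exact ⟨this ▸ hp, Or.inr h2⟩
  · rintro ⟨hq, hb⟩
    exact ⟨q, List.mem_range.2 hq, by rcases hb with h | h <;> simp [h]⟩

theorem pvKeys_nodup (m : Nat) : (pvKeys m).Nodup := by
  induction m with
  | zero => simp [pvKeys]
  | succ n ih =>
    rw [pvKeys_succ]
    refine List.Nodup.append ih (by simp) ?_
    intro x hx hy
    simp only [List.mem_cons] at hy
    rcases hy with rfl | rfl | h
    · exact absurd ((mem_pvKeys).1 hx).1 (by omega)
    · exact absurd ((mem_pvKeys).1 hx).1 (by omega)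
    · simp at h

-- conditional zero-seeding never changes any getD-with-default-0 lookup
theorem seed_getD (d : PySem.Dict (Int × Int) Int) (k k' : Int × Int) :
    ((if d.contains k = false then d.insert k 0 else d).getD k' 0) = d.getD k' 0 := by
  split_ifs with h
  · rw [PySem.Dict.getD_insert]
    split_ifs with h2
    · subst h2; exact (PySem.Dict.getD_of_not_contains d 0 h).symm
    · rfl
  · rfl

theorem pvA_inner_getD0 (cs : List Char) : ∀ (j : Nat) (d : PySem.Dict (Int × Int) Int) (q : Nat),
    (pvA_inner cs j d).getD ((q : Int), 0) 0
      = d.getD ((q : Int), 0) 0 + (if j ≤ q then pvHit0 cs[q - j]? else 0) := by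
  induction cs with
  | nil => intro j d q; simp [pvA_inner, pvHit0]
  | cons c rest ih =>
    intro j d q
    show (pvA_inner rest (j+1) _).getD _ _ = _
    rw [ih]
    set d1 := (if d.contains ((j:Int), 0) = false then d.insert ((j:Int), 0) 0 else d) with hd1
    set d2 := (if d1.contains ((j:Int), 1) = false then d1.insert ((j:Int), 1) 0 else d1) with hd2
    have hg2 : ∀ k', d2.getD k' 0 = d.getD k' 0 := by
      intro k'; rw [hd2, seed_getD, hd1, seed_getD]
    by_cases hc : c = '0'
    · simp only [hc, if_true]
      rw [PySem.Dict.getD_insert]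
      by_cases hqj : q = j
      · subst hqj
        rw [if_pos rfl, hg2]
        simp [pvHit0]
      · have hne : ((q:Int), (0:Int)) ≠ ((j:Int), 0) := by
          simp only [ne_eq, Prod.mk.injEq, not_and]; intro h; exact absurd (by exact_mod_cast h) hqj
        rw [if_neg hne, hg2]
        congr 1
        by_cases hle : j ≤ q
        · rw [if_pos hle, if_pos (by omega : j + 1 ≤ q)]
          have : q - j = (q - (j+1)) + 1 := by omega
          rw [this]; rfl
        · rw [if_neg hle, if_neg (by omega)]
    · rw [if_neg hc]
      rw [PySem.Dict.getD_insert, if_neg (by simp), hg2]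
      congr 1
      by_cases hqj : q = j
      · subst hqj; rw [if_pos le_rfl, if_neg (by omega)]
        simp [pvHit0, hc]
      · by_cases hle : j ≤ q
        · rw [if_pos hle, if_pos (by omega)]
          have : q - j = (q - (j+1)) + 1 := by omega
          rw [this]; rfl
        · rw [if_neg hle, if_neg (by omega)]

theorem pvA_inner_getD1 (cs : List Char) : ∀ (j : Nat) (d : PySem.Dict (Int × Int) Int) (q : Nat),
    (pvA_inner cs j d).getD ((q : Int), 1) 0
      = d.getD ((q : Int), 1) 0 + (if j ≤ q then pvHit1 cs[q - j]? else 0) := by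
  induction cs with
  | nil => intro j d q; simp [pvA_inner, pvHit1]
  | cons c rest ih =>
    intro j d q
    show (pvA_inner rest (j+1) _).getD _ _ = _
    rw [ih]
    set d1 := (if d.contains ((j:Int), 0) = false then d.insert ((j:Int), 0) 0 else d) with hd1
    set d2 := (if d1.contains ((j:Int), 1) = false then d1.insert ((j:Int), 1) 0 else d1) with hd2
    have hg2 : ∀ k', d2.getD k' 0 = d.getD k' 0 := by
      intro k'; rw [hd2, seed_getD, hd1, seed_getD]
    by_cases hc : c = '0'
    · simp only [hc, if_true]
      rw [PySem.Dict.getD_insert, if_neg (by simp), hg2]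
      congr 1
      by_cases hqj : q = j
      · subst hqj; rw [if_pos le_rfl, if_neg (by omega)]
        simp [pvHit1]
      · by_cases hle : j ≤ q
        · rw [if_pos hle, if_pos (by omega)]
          have : q - j = (q - (j+1)) + 1 := by omega
          rw [this]; rfl
        · rw [if_neg hle, if_neg (by omega)]
    · rw [if_neg hc]
      rw [PySem.Dict.getD_insert]
      by_cases hqj : q = j
      · subst hqj
        rw [if_pos rfl, hg2]
        simp [pvHit1, hc]
      · have hne : ((q:Int), (1:Int)) ≠ ((j:Int), 1) := by
          simp only [ne_eq, Prod.mk.injEq, not_and]; intro h; exact absurd (by exact_mod_cast h) hqj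
        rw [if_neg hne, hg2]
        congr 1
        by_cases hle : j ≤ q
        · rw [if_pos hle, if_pos (by omega)]
          have : q - j = (q - (j+1)) + 1 := by omega
          rw [this]; rfl
        · rw [if_neg hle, if_neg (by omega)]

theorem pvA_inner_keys (cs : List Char) : ∀ (j M : Nat) (d : PySem.Dict (Int × Int) Int),
    j ≤ M → d.keys = pvKeys M →
    (pvA_inner cs j d).keys = pvKeys (max M (j + cs.length)) := by
  induction cs with
  | nil =>
    intro j M d hj hk
    simpa [pvA_inner, Nat.max_eq_left hj] using hk
  | cons c rest ih =>
    intro j M d hj hk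
    have key : ∀ b : Int, b = 0 ∨ b = 1 → ∀ m : Nat, j < m →
        ∀ d' : PySem.Dict (Int × Int) Int, d'.keys = pvKeys m → d'.contains ((j:Int), b) = true := by
      intro b hb m hm d' hk'
      rw [PySem.Dict.contains_eq_decide_mem_keys, hk']
      simp [mem_pvKeys.2 ⟨hm, hb⟩]
    have step : ∃ d3 : PySem.Dict (Int × Int) Int,
        (pvA_inner (c :: rest) j d) = pvA_inner rest (j+1) d3 ∧ d3.keys = pvKeys (max M (j+1)) := by
      by_cases hjM : j < M
      · have hmax : max M (j+1) = M := by omega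
        have hc0 := key 0 (Or.inl rfl) M hjM d hk
        have hc1 := key 1 (Or.inr rfl) M hjM d hk
        refine ⟨_, rfl, ?_⟩
        simp only [hc0, hc1, Bool.true_eq_false, if_false]
        rw [hmax]
        by_cases hc : c = '0'
        · rw [if_pos hc, PySem.Dict.keys_insert_of_contains d _ hc0]; exact hk
        · rw [if_neg hc, PySem.Dict.keys_insert_of_contains d _ hc1]; exact hk
      · have hjeq : j = M := by omega
        subst hjeq
        have hc0 : d.contains ((j:Int), 0) = false := by
          rw [PySem.Dict.contains_eq_decide_mem_keys, hk]
          simp only [decide_eq_false_iff_not]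
          intro hmem; exact absurd (mem_pvKeys.1 hmem).1 (by omega)
        have hk1 : (d.insert ((j:Int), 0) 0).keys = pvKeys j ++ [((j:Int), 0)] := by
          rw [PySem.Dict.keys_insert_of_not_contains d _ hc0, hk]
        have hc1 : (d.insert ((j:Int), 0) 0).contains ((j:Int), 1) = false := by
          rw [PySem.Dict.contains_eq_decide_mem_keys, hk1]
          simp only [decide_eq_false_iff_not, List.mem_append, List.mem_singleton]
          rintro (hmem | hmem)
          · exact absurd (mem_pvKeys.1 hmem).1 (by omega)
          · exact absurd (Prod.mk.injEq .. ▸ hmem).2 (by norm_num)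
        have hk2 : ((d.insert ((j:Int), 0) 0).insert ((j:Int), 1) 0).keys = pvKeys (j+1) := by
          rw [PySem.Dict.keys_insert_of_not_contains _ _ hc1, hk1, pvKeys_succ, List.append_assoc]
          rfl
        have hmax : max j (j+1) = j + 1 := by omega
        refine ⟨_, rfl, ?_⟩
        simp only [hc0, hc1, if_true]
        rw [hmax]
        have hcont : ∀ b : Int, b = 0 ∨ b = 1 →
            ((d.insert ((j:Int), 0) 0).insert ((j:Int), 1) 0).contains ((j:Int), b) = true :=
          fun b hb => key b hb (j+1) (by omega) _ hk2
        by_cases hc : c = '0'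
        · rw [if_pos hc, PySem.Dict.keys_insert_of_contains _ _ (hcont 0 (Or.inl rfl))]; exact hk2
        · rw [if_neg hc, PySem.Dict.keys_insert_of_contains _ _ (hcont 1 (Or.inr rfl))]; exact hk2
    obtain ⟨d3, heq, hk3⟩ := step
    rw [heq, ih (j+1) (max M (j+1)) d3 (by omega) hk3]
    congr 1
    simp only [List.length_cons]
    omega

theorem pvCol_cons_count (n : String) (rest : List String) (q : Nat) :
    ((pvCol (n :: rest) q).count '0' : Int) = pvHit0 n.toList[q]? + ((pvCol rest q).count '0' : Int) := by
  unfold pvCol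
  rw [List.filterMap_cons]
  cases h : n.toList[q]? with
  | none => simp [pvHit0]
  | some c =>
    by_cases hc : c = '0'
    · simp [pvHit0, hc]; ring
    · simp [pvHit0, hc]

theorem pvCol_cons_countP (n : String) (rest : List String) (q : Nat) :
    (((pvCol (n :: rest) q).countP (fun c => !(c == '0'))) : Int)
      = pvHit1 n.toList[q]? + (((pvCol rest q).countP (fun c => !(c == '0'))) : Int) := by
  unfold pvCol
  rw [List.filterMap_cons]
  cases h : n.toList[q]? with
  | none => simp [pvHit1]
  | some c =>
    by_cases hc : c = '0'
    · simp [pvHit1, hc]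
    · simp [pvHit1, hc]; ring

theorem pvA_outer_getD0 (rows : List String) : ∀ (d : PySem.Dict (Int × Int) Int) (q : Nat),
    (rows.foldl (fun counters numbers => pvA_inner numbers.toList 0 counters) d).getD ((q : Int), 0) 0
      = d.getD ((q : Int), 0) 0 + ((pvCol rows q).count '0' : Int) := by
  induction rows with
  | nil => intro d q; simp [pvCol]
  | cons n rest ih =>
    intro d q
    rw [List.foldl_cons, ih, pvA_inner_getD0, if_pos (Nat.zero_le q), Nat.sub_zero, pvCol_cons_count]
    ring

theorem pvA_outer_getD1 (rows : List String) : ∀ (d : PySem.Dict (Int × Int) Int) (q : Nat),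
    (rows.foldl (fun counters numbers => pvA_inner numbers.toList 0 counters) d).getD ((q : Int), 1) 0
      = d.getD ((q : Int), 1) 0 + ((pvCol rows q).countP (fun c => !(c == '0')) : Int) := by
  induction rows with
  | nil => intro d q; simp [pvCol]
  | cons n rest ih =>
    intro d q
    rw [List.foldl_cons, ih, pvA_inner_getD1, if_pos (Nat.zero_le q), Nat.sub_zero, pvCol_cons_countP]
    ring

theorem pvA_outer_keys (rows : List String) : ∀ (d : PySem.Dict (Int × Int) Int) (M : Nat),
    d.keys = pvKeys M →
    (rows.foldl (fun counters numbers => pvA_inner numbers.toList 0 counters) d).keys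
      = pvKeys (rows.foldl (fun m n => max m n.toList.length) M) := by
  induction rows with
  | nil => intro d M h; simpa using h
  | cons n rest ih =>
    intro d M h
    rw [List.foldl_cons, List.foldl_cons]
    exact ih _ _ (by simpa using pvA_inner_keys n.toList 0 M d (Nat.zero_le M) h)

theorem pvB_items (report : List String) (m : Nat) :
    ((List.range m).foldl
      (fun counters position =>
        let column := report.filterMap (fun n => n.toList[position]?)
        let zeros : Int := column.count '0'
        (counters.insert ((position : Int), 0) zeros).insert
          ((position : Int), 1) ((column.length : Int) - zeros))
      PySem.Dict.empty).items
      = (List.range m).flatMap (fun (p : Nat) =>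
          [(((p : Int), (0 : Int)), ((pvCol report p).count '0' : Int)),
           (((p : Int), (1 : Int)), ((pvCol report p).length : Int) - ((pvCol report p).count '0' : Int))]) := by
  induction m with
  | zero => rfl
  | succ k ih =>
    rw [List.range_succ, List.foldl_append, List.foldl_cons, List.foldl_nil]
    set prev := (List.range k).foldl _ PySem.Dict.empty with hp
    have hkeys : prev.keys = pvKeys k := by
      show prev.items.map Prod.fst = _
      rw [ih]
      simp [pvKeys, List.map_flatMap]
    have hc0 : prev.contains ((k:Int), 0) = false := by
      rw [PySem.Dict.contains_eq_decide_mem_keys, hkeys]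
      simp only [decide_eq_false_iff_not]
      intro hmem; exact absurd (mem_pvKeys.1 hmem).1 (by omega)
    have hk1 : (prev.insert ((k:Int), 0) ((pvCol report k).count '0' : Int)).keys
        = pvKeys k ++ [((k:Int), 0)] := by
      rw [PySem.Dict.keys_insert_of_not_contains _ _ hc0, hkeys]
    have hc1 : (prev.insert ((k:Int), 0) ((pvCol report k).count '0' : Int)).contains ((k:Int), 1) = false := by
      rw [PySem.Dict.contains_eq_decide_mem_keys, hk1]
      simp only [decide_eq_false_iff_not, List.mem_append, List.mem_singleton]
      rintro (hmem | hmem)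
      · exact absurd (mem_pvKeys.1 hmem).1 (by omega)
      · exact absurd (Prod.mk.injEq .. ▸ hmem).2 (by norm_num)
    show ((prev.insert ((k:Int), 0) ((pvCol report k).count '0' : Int)).insert
        ((k:Int), 1) (((pvCol report k).length : Int) - ((pvCol report k).count '0' : Int))).items = _
    rw [PySem.Dict.items_insert_of_not_contains _ _ hc1,
        PySem.Dict.items_insert_of_not_contains _ _ hc0, ih]
    simp [List.flatMap_append, List.append_assoc]

-- ===== VERDICT (by name: the statement is the Claim_ definition above) =====
theorem count_rate_py_spec : Claim_equal_count_rate_py := by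
  unfold Claim_equal_count_rate_py Spec_count_rate_py
  intro report _
  unfold count_rate_py count_rate_py_alt
  congr 1
  rw [pvB_items]
  have hkeys := pvA_outer_keys report PySem.Dict.empty 0 (by rfl)
  have hnodup : (report.foldl (fun counters numbers => pvA_inner numbers.toList 0 counters)
      PySem.Dict.empty).keys.Nodup := hkeys ▸ pvKeys_nodup _
  rw [PySem.Dict.items_eq_map_keys _ hnodup 0, hkeys]
  unfold pvKeys
  rw [List.map_flatMap]
  congr 1
  funext p
  rw [List.map_cons, List.map_cons, List.map_nil]
  have h0 := pvA_outer_getD0 report PySem.Dict.empty p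
  have h1 := pvA_outer_getD1 report PySem.Dict.empty p
  simp only [PySem.Dict.getD_empty, zero_add] at h0 h1
  rw [h0, h1]
  have hcnt : (pvCol report p).length
      = (pvCol report p).count '0' + (pvCol report p).countP (fun c => !(c == '0')) := by
    have h := List.length_eq_countP_add_countP (p := fun c : Char => c == '0') (l := pvCol report p)
    rw [List.count]
    simpa using h
  have hval : ((pvCol report p).countP (fun c => !(c == '0')) : Int)
      = ((pvCol report p).length : Int) - ((pvCol report p).count '0' : Int) := by
    rw [hcnt]; push_cast; ring
  rw [hval]
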